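-- pv_equiv track=rewrite | github.com/yuracoff18/LPInterpreter | parteA_Yura.py | valid_LP
-- ===== SOURCE A (Python) =====
-- op = {
--     "&": lambda x, y: x and y,
--     "|": lambda x, y: x or y,
-- }
--
-- def valid_LP(LP):
--     pila = []
--     ans = None
--     for i in range(len(LP)):
--         char = LP[i]
--         if char == "(" or char == ")" or char in op:
--             pila.append(char)
--             if len(pila) >= 3:
--                 if pila[-1] == ")" and pila[-2] in op and pila[-3] == "(":
--                     pila.pop()
--                     pila.pop()
--                     pila.pop()
--     if len(pila) == 0:
--         ans = True
--     else:
--         ans = False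
--
--     return ans
-- ===== SOURCE B (Python) =====
-- op = {
--     "&": lambda x, y: x and y,
--     "|": lambda x, y: x or y,
-- }
--
-- def valid_LP(LP):
--     toks = [c for c in LP if c == "(" or c == ")" or c in op]
--     changed = True
--     while changed:
--         changed = False
--         out = []
--         i = 0
--         n = len(toks)
--         while i < n:
--             if i + 2 < n and toks[i] == "(" and toks[i + 1] in op and toks[i + 2] == ")":
--                 i += 3
--                 changed = True
--             else:
--                 out.append(toks[i])
--                 i += 1
--         toks = out
--     return len(toks) == 0
-- ===== Notes on version B (the rewrite author's own statement) =====
-- stated objective: alternative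
-- what changed: Replaces A's single-pass explicit stack (push each relevant token, pop when the top three form an open-bracket/operator/close-bracket group) with a filter of the relevant tokens followed by repeated full scans that delete every consecutive bracket-operator-bracket triple until a fixpoint; returns True iff the normal form is empty.
import Mathlib
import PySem

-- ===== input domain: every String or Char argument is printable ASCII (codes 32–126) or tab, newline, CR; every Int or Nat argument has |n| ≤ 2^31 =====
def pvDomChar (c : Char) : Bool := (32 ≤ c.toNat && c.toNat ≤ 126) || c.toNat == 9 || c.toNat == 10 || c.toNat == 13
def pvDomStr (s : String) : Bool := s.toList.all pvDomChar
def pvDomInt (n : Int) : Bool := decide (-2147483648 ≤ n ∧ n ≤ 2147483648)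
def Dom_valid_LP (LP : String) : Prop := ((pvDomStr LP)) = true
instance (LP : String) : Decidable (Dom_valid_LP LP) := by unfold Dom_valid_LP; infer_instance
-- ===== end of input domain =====

-- B replaces A's single-pass stack with a repeated-scan fixpoint reduction deleting bracket-operator-bracket triples (alternative algorithm, same return value).


-- ===== PORT A =====
-- A pushes each relevant char on the stack, then pops three when the top is ')' , op , '('.
def stepA (pila : List Char) : List Char :=
  match pila with
  | c1 :: c2 :: c3 :: t =>
      if c1 == ')' && (c2 == '&' || c2 == '|') && c3 == '(' then t else pila
  | _ => pila

def valid_LP (LP : String) : Bool :=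
  (LP.toList.foldl (fun pila char =>
    if char == '(' || char == ')' || char == '&' || char == '|' then
      stepA (char :: pila)
    else pila) []).isEmpty

-- ===== PORT B =====
def isOpB (c : Char) : Bool := c == '&' || c == '|'
def isTok (c : Char) : Bool := c == '(' || c == ')' || isOpB c

-- one left-to-right scan of the inner while loop: remove each consecutive '(',op,')' triple; snd = changed
def onePass : List Char → List Char × Bool
  | c1 :: c2 :: c3 :: rest =>
      if c1 == '(' && isOpB c2 && c3 == ')' then
        ((onePass rest).1, true)
      else
        let r := onePass (c2 :: c3 :: rest)
        (c1 :: r.1, r.2)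
  | c :: rest =>
      let r := onePass rest
      (c :: r.1, r.2)
  | [] => ([], false)


theorem onePass_len_le (l : List Char) : (onePass l).1.length ≤ l.length := by
  fun_induction onePass l with
  | case1 c1 c2 c3 rest hc ih =>
      exact le_trans ih (by simp; omega)
  | case2 c1 c2 c3 rest hc r ih =>
      have hx : r.1.length ≤ rest.length + 2 := ih
      show (c1 :: r.1).length ≤ rest.length + 3
      simp; omega
  | case3 c rest hne r ih =>
      have hx : r.1.length ≤ rest.length := ih
      show (c :: r.1).length ≤ rest.length + 1
      simp; omega
  | case4 => simp

theorem onePass_len_lt (l : List Char) (h : (onePass l).2 = true) :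
    (onePass l).1.length < l.length := by
  fun_induction onePass l with
  | case1 c1 c2 c3 rest hc =>
      have := onePass_len_le rest
      exact lt_of_le_of_lt this (by simp; omega)
  | case2 c1 c2 c3 rest hc r ih =>
      have hx : r.1.length < rest.length + 2 := ih h
      show (c1 :: r.1).length < rest.length + 3
      simp; omega
  | case3 c rest hne r ih =>
      have hx : r.1.length < rest.length := ih h
      show (c :: r.1).length < rest.length + 1
      simp; omega
  | case4 => simp at h

-- the outer while-changed loop: reduce to a fixpoint
def reduce (l : List Char) : List Char :=
  let r := onePass l
  if _h : r.2 = true then reduce r.1 else r.1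
termination_by l.length
decreasing_by exact onePass_len_lt l _h

def valid_LP_alt (LP : String) : Bool :=
  (reduce (LP.toList.filter isTok)).isEmpty

-- ===== PRECONDITION & SPEC =====
def Spec_valid_LP (LP : String) (out : Bool) : Prop := out = valid_LP_alt LP
instance (LP : String) (out : Bool) : Decidable (Spec_valid_LP LP out) := by unfold Spec_valid_LP; infer_instance

-- ===== CLAIM (what is proved, stated in full; the proofs are below) =====
def Claim_equal_valid_LP : Prop := ∀ (LP : String), Dom_valid_LP LP → Spec_valid_LP LP (valid_LP LP)

-- ===== LEMMAS AND PROOFS =====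

-- A's stack run over a token list
def run (s : List Char) (l : List Char) : List Char :=
  l.foldl (fun s c => stepA (c :: s)) s

theorem run_append (s : List Char) (l1 l2 : List Char) :
    run s (l1 ++ l2) = run (run s l1) l2 := List.foldl_append

theorem run_cons (s : List Char) (c : Char) (l : List Char) :
    run s (c :: l) = run (stepA (c :: s)) l := rfl

-- A's in-loop guard equals isTok
theorem guard_eq_isTok (c : Char) :
    (c == '(' || c == ')' || c == '&' || c == '|') = isTok c := by
  simp [isTok, isOpB, Bool.or_assoc]

theorem fold_filter_tok (l : List Char) (s : List Char) :
    l.foldl (fun s c => if isTok c then stepA (c :: s) else s) s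
      = run s (l.filter isTok) := by
  induction l generalizing s with
  | nil => rfl
  | cons c l ih =>
      simp only [List.foldl_cons, List.filter_cons]
      by_cases h : isTok c = true
      · rw [if_pos h, if_pos h, run_cons]
        exact ih (stepA (c :: s))
      · rw [if_neg h, if_neg h]
        exact ih s

theorem fold_filter (l : List Char) (s : List Char) :
    l.foldl (fun s c => if c == '(' || c == ')' || c == '&' || c == '|'
        then stepA (c :: s) else s) s = run s (l.filter isTok) := by
  have hf : (fun (s : List Char) (c : Char) =>
      if c == '(' || c == ')' || c == '&' || c == '|' then stepA (c :: s) else s)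
      = (fun s c => if isTok c then stepA (c :: s) else s) := by
    funext s c; rw [guard_eq_isTok]
  rw [hf]
  exact fold_filter_tok l s

theorem run_triple (s : List Char) (o : Char) (ho : isOpB o = true) :
    run s ['(', o, ')'] = s := by
  have ho' : o = '&' ∨ o = '|' := by simpa [isOpB] using ho
  rcases s with _ | ⟨a, _ | ⟨b, t⟩⟩ <;> rcases ho' with h | h <;>
    simp_all [run, stepA]

-- one pass preserves A's stack result
theorem run_onePass (l : List Char) (s : List Char) :
    run s (onePass l).1 = run s l := by
  fun_induction onePass l generalizing s with
  | case1 c1 c2 c3 rest hc ih =>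
      obtain ⟨⟨h1, h2⟩, h3⟩ : (c1 = '(' ∧ isOpB c2 = true) ∧ c3 = ')' := by
        simpa using hc
      subst h1; subst h3
      have e : run s ('(' :: c2 :: ')' :: rest) = run s rest := by
        have ha := run_append s ['(', c2, ')'] rest
        rw [run_triple s c2 h2] at ha
        simpa using ha
      show run s (onePass rest).1 = _
      rw [ih s]
      exact e.symm
  | case2 c1 c2 c3 rest hc r ih =>
      show run s (c1 :: r.1) = _
      rw [run_cons, run_cons]
      exact ih (stepA (c1 :: s))
  | case3 c rest hne r ih =>
      show run s (c :: r.1) = _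
      rw [run_cons, run_cons]
      exact ih (stepA (c :: s))
  | case4 => rfl

-- "no consecutive '(',op,')' triple anywhere"
def NoTriple (l : List Char) : Prop :=
  ∀ (u v : List Char) (o : Char), isOpB o = true → l ≠ u ++ '(' :: o :: ')' :: v

theorem onePass_fix (l : List Char) (h : (onePass l).2 = false) :
    (onePass l).1 = l ∧ NoTriple l := by
  fun_induction onePass l with
  | case1 c1 c2 c3 rest hc => simp at h
  | case2 c1 c2 c3 rest hc r ih =>
      simp only at h
      obtain ⟨heq, hnt⟩ := ih h
      refine ⟨congrArg (List.cons c1) heq, ?_⟩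
      intro u v o ho hbad
      cases u with
      | nil =>
          simp only [List.nil_append, List.cons.injEq] at hbad
          obtain ⟨e1, e2, e3, _⟩ := hbad
          simp_all
      | cons a u' =>
          simp only [List.cons_append, List.cons.injEq] at hbad
          exact hnt u' v o ho hbad.2
  | case3 c rest hne r ih =>
      simp only at h
      obtain ⟨heq, hnt⟩ := ih h
      refine ⟨congrArg (List.cons c) heq, ?_⟩
      intro u v o ho hbad
      cases u with
      | nil =>
          simp only [List.nil_append, List.cons.injEq] at hbad
          exact hne o ')' v hbad.2
      | cons a u' =>
          simp only [List.cons_append, List.cons.injEq] at hbad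
          exact hnt u' v o ho hbad.2
  | case4 => exact ⟨rfl, by intro u v o ho hbad; simp at hbad⟩

-- on a triple-free list the stack never pops: it is just the reversed list
theorem run_noTriple (l : List Char) (p : List Char)
    (h : NoTriple (p.reverse ++ l)) : run p l = l.reverse ++ p := by
  induction l generalizing p with
  | nil => simp [run]
  | cons c l' ih =>
      have hstep : stepA (c :: p) = c :: p := by
        rcases p with _ | ⟨a, _ | ⟨b, t⟩⟩
        · rfl
        · rfl
        · simp only [stepA]
          split_ifs with hcond
          · exfalso
            simp only [Bool.and_eq_true, beq_iff_eq, Bool.or_eq_true] at hcond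
            obtain ⟨⟨e1, e2⟩, e3⟩ := hcond
            have hop : isOpB a = true := by
              rcases e2 with h2 | h2 <;> simp [isOpB, h2]
            apply h t.reverse l' a hop
            subst e1; subst e3
            simp
          · rfl
      have hrec : NoTriple ((c :: p).reverse ++ l') := by
        intro u v o ho hbad
        exact h u v o ho (by simpa using hbad)
      have := ih (c :: p) hrec
      rw [run_cons, hstep, this]
      simp

theorem run_reduce (l : List Char) (s : List Char) :
    run s (reduce l) = run s l := by
  fun_induction reduce l with
  | case1 l r hr ih => rw [ih]; simpa [r] using run_onePass l s
  | case2 l r hr => simpa [r] using run_onePass l s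

theorem noTriple_reduce (l : List Char) : NoTriple (reduce l) := by
  fun_induction reduce l with
  | case1 l r hr ih => exact ih
  | case2 l r hr =>
      have := onePass_fix l (by simpa using hr)
      simpa [r, this.1] using this.2

-- ===== VERDICT (by name: the statement is the Claim_ definition above) =====
theorem valid_LP_spec : Claim_equal_valid_LP := by
  intro LP _
  unfold Spec_valid_LP valid_LP valid_LP_alt
  rw [fold_filter]
  set t := LP.toList.filter isTok with ht
  have h1 : run [] t = run [] (reduce t) := (run_reduce t []).symm
  have h2 : run [] (reduce t) = (reduce t).reverse ++ [] :=
    run_noTriple (reduce t) [] (by simpa using noTriple_reduce t)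
  rw [h1, h2]
  simp
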